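-- pv_equiv track=rewrite | github.com/Bhare8972/LOFAR-LIM | LIM_scripts/find_all_PSETST2.py | station_combinations
-- ===== SOURCE A (Python) =====
-- def station_combinations(stations, num_to_pick=5, exclude_station=None):
--     def recursive_combiner(current_solution, viable_stations, num_to_add):
--         if num_to_add == 0:
--             return [current_solution]
--
--         ret = []
--
--         N = len(viable_stations) - num_to_add + 1
--         for i in range(N):
--             if exclude_station is not None and viable_stations[i]==exclude_station:
--                 continue
--
--             new_solution = list(current_solution)
--             new_solution.append( viable_stations[i] )
--
--             ret.append( recursive_combiner( new_solution, viable_stations[i+1:], num_to_add-1 ) )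
--
--         return [item for sublist in ret for item in sublist]
--
--     return recursive_combiner([], stations, num_to_pick)
-- ===== SOURCE B (Python) =====
-- def station_combinations(stations, num_to_pick=5, exclude_station=None):
--     # Filter once, then build combinations bottom-up with a DP table over suffixes:
--     # rows[j] holds all j-combinations of the suffix processed so far, in lexicographic order.
--     viable = [s for s in stations if s != exclude_station]
--     if num_to_pick < 0 or num_to_pick > len(viable):
--         return []
--     rows = [[[]]] + [[] for _ in range(num_to_pick)]
--     for s in reversed(viable):
--         rows = [rows[0]] + [[[s] + c for c in rows[j - 1]] + rows[j]
--                             for j in range(1, len(rows))]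
--     return rows[num_to_pick]
-- ===== Notes on version B (the rewrite author's own statement) =====
-- stated objective: alternative
-- what changed: B filters the excluded station once, then builds all k-combinations bottom-up with a dynamic-programming table of rows (rows[j] = j-combinations of the processed suffix) folded over the reversed list, instead of A's top-down recursion with list slicing and per-call flattening.
import Mathlib
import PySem

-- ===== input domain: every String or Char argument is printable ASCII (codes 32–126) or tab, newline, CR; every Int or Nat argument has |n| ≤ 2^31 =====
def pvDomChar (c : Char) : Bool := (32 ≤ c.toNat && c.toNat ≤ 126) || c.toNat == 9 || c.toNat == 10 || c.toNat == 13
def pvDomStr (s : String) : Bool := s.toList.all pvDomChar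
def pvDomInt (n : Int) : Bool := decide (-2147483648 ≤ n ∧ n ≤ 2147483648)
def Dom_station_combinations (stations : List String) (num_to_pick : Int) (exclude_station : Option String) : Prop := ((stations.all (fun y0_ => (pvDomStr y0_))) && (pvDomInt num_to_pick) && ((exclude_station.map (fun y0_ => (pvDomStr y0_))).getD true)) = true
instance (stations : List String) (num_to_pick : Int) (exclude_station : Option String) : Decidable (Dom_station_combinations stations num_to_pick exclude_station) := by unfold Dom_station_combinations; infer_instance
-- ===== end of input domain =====

-- B replaces A's top-down recursion (with slicing and flattening) by a filter-first,
-- bottom-up DP over suffixes; same return value on every num_to_pick ≥ 0 (where A returns).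

-- ===== PORT A =====
-- literal port of A's inner 'recursive_combiner'; the 'none' branch of pyGet? is where
-- Python raises IndexError (reachable only for num_to_add < 0, excluded by Pre_)
def recursive_combiner (exclude_station : Option String) (current_solution : List String)
    (viable_stations : List String) (num_to_add : Int) : List (List String) :=
  if num_to_add = 0 then [current_solution]
  else
    ((PySem.List.pyRange 0 ((viable_stations.length : Int) - num_to_add + 1) 1).attach.map
      (fun ⟨i, hi⟩ =>
        match h : PySem.List.pyGet? viable_stations i with
        | none => []  -- IndexError
        | some v =>
          if exclude_station.isSome ∧ exclude_station = some v then []  -- 'continue'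
          else recursive_combiner exclude_station (current_solution ++ [v])
                 (PySem.List.slice viable_stations (some (i + 1)) none) (num_to_add - 1))).flatten
termination_by viable_stations.length
decreasing_by
  have h0 : (0:Int) ≤ i := ((PySem.List.mem_pyRange_one.1 hi).1)
  have hlen : viable_stations ≠ [] := by
    intro hnil; rw [hnil] at h; simp [PySem.List.pyGet?, PySem.List.pyIdx?] at h
  have hpos : 0 < viable_stations.length := List.length_pos_of_ne_nil hlen
  rw [PySem.List.slice_from viable_stations (by omega)]
  rw [List.length_drop]
  omega

def station_combinations (stations : List String) (num_to_pick : Int) (exclude_station : Option String) : List (List String) :=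
  recursive_combiner exclude_station [] stations num_to_pick

-- ===== PORT B =====
-- row update of Source B's comprehension: new rows[j] = [[s]+c for c in rows[j-1]] + rows[j]
def updRows (s : String) (prev : List (List String)) : List (List (List String)) → List (List (List String))
  | [] => []
  | r :: rs => (prev.map (fun c => s :: c) ++ r) :: updRows s r rs

def station_combinations_alt (stations : List String) (num_to_pick : Int) (exclude_station : Option String) : List (List String) :=
  let viable := stations.filter (fun s => !(some s == exclude_station))
  if num_to_pick < 0 ∨ (viable.length : Int) < num_to_pick then []
  else
    let rows0 : List (List (List String)) := [[]] :: List.replicate num_to_pick.toNat []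
    let rows := viable.reverse.foldl (fun rows s =>
      match rows with
      | [] => []  -- unreachable: rows stays nonempty
      | r0 :: rest => r0 :: updRows s r0 rest) rows0
    rows.getD num_to_pick.toNat []  -- rows[num_to_pick]; exact here since 0 ≤ num_to_pick < rows.length

-- ===== PRECONDITION & SPEC =====
-- Pre_ excludes num_to_pick < 0, on which A recurses to an empty slice and raises IndexError.
def Pre_station_combinations (stations : List String) (num_to_pick : Int) (exclude_station : Option String) : Prop :=
  0 ≤ num_to_pick
instance (stations : List String) (num_to_pick : Int) (exclude_station : Option String) : Decidable (Pre_station_combinations stations num_to_pick exclude_station) := by unfold Pre_station_combinations; infer_instance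

def pvWitness_station_combinations : List String × Int × Option String := (["a", "x", "b", "c"], 2, some "x")

def Spec_station_combinations (stations : List String) (num_to_pick : Int) (exclude_station : Option String) (out : List (List String)) : Prop := out = station_combinations_alt stations num_to_pick exclude_station
instance (stations : List String) (num_to_pick : Int) (exclude_station : Option String) (out : List (List String)) : Decidable (Spec_station_combinations stations num_to_pick exclude_station out) := by unfold Spec_station_combinations; infer_instance

-- ===== CLAIM (what is proved, stated in full; the proofs are below) =====
def Claim_equal_station_combinations : Prop := ∀ (stations : List String) (num_to_pick : Int) (exclude_station : Option String), Dom_station_combinations stations num_to_pick exclude_station → Pre_station_combinations stations num_to_pick exclude_station → Spec_station_combinations stations num_to_pick exclude_station (station_combinations stations num_to_pick exclude_station)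

-- ===== LEMMAS AND PROOFS =====

-- the common mathematical value: lexicographic k-combinations of a list
def combos : List String → Nat → List (List String)
  | _, 0 => [[]]
  | [], _ + 1 => []
  | x :: xs, n + 1 => ((combos xs n).map (fun c => x :: c)) ++ combos xs (n + 1)

lemma combos_zero (t : List String) : combos t 0 = [[]] := by cases t <;> rfl

lemma combos_of_length_lt : ∀ (t : List String) (n : Nat), t.length < n → combos t n = [] := by
  intro t
  induction t with
  | nil => intro n h; cases n with | zero => omega | succ m => rfl
  | cons x xs ih =>
    intro n h
    cases n with
    | zero => omega
    | succ m =>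
      simp only [combos]
      rw [ih m (by simp at h; omega), ih (m + 1) (by simp at h ⊢; omega)]
      rfl

-- ---- B side ----

def rowsAux (t : List String) : Nat → Nat → List (List (List String))
  | _, 0 => []
  | j, m + 1 => combos t j :: rowsAux t (j + 1) m

lemma rowsAux_nil : ∀ (m j : Nat), rowsAux [] (j + 1) m = List.replicate m [] := by
  intro m
  induction m with
  | zero => intro j; rfl
  | succ m ih =>
    intro j
    simp only [rowsAux, List.replicate, ih (j + 1)]
    rw [show combos [] (j + 1) = [] from rfl]

lemma rowsAux_nil_one (m : Nat) : rowsAux [] 1 m = List.replicate m [] := rowsAux_nil m 0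

lemma updRows_spec (s : String) : ∀ (m j : Nat) (t : List String),
    updRows s (combos t j) (rowsAux t (j + 1) m) = rowsAux (s :: t) (j + 1) m := by
  intro m
  induction m with
  | zero => intro j t; rfl
  | succ m ih =>
    intro j t
    simp only [rowsAux, updRows, ih (j + 1) t]
    rfl

lemma updRows_spec_one (s : String) (m : Nat) (t : List String) :
    updRows s (combos t 0) (rowsAux t 1 m) = rowsAux (s :: t) 1 m := updRows_spec s m 0 t

lemma getD_rowsAux (t : List String) (d : List (List String)) :
    ∀ (m j i : Nat), i < m → (rowsAux t j m).getD i d = combos t (j + i) := by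
  intro m
  induction m with
  | zero => intro j i h; omega
  | succ m ih =>
    intro j i h
    cases i with
    | zero => simp [rowsAux]
    | succ i =>
      simp only [rowsAux, List.getD_cons_succ]
      rw [ih (j + 1) i (by omega)]
      congr 1
      omega

lemma foldl_rows (m : Nat) : ∀ (l t : List String),
    l.foldl (fun rows s =>
      match rows with
      | [] => []
      | r0 :: rest => r0 :: updRows s r0 rest) (combos t 0 :: rowsAux t 1 m)
      = combos (l.reverse ++ t) 0 :: rowsAux (l.reverse ++ t) 1 m := by
  intro l
  induction l with
  | nil => intro t; simp
  | cons s l ih =>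
    intro t
    simp only [List.foldl_cons]
    rw [updRows_spec_one, combos_zero t, ← combos_zero (s :: t), ih (s :: t)]
    simp

lemma alt_eq_combos (stations : List String) (num_to_pick : Int) (exclude_station : Option String)
    (h : 0 ≤ num_to_pick) :
    station_combinations_alt stations num_to_pick exclude_station
      = combos (stations.filter (fun s => !(some s == exclude_station))) num_to_pick.toNat := by
  simp only [station_combinations_alt]
  set viable := stations.filter (fun s => !(some s == exclude_station)) with hv
  by_cases hbig : (viable.length : Int) < num_to_pick
  · rw [if_pos (Or.inr hbig), combos_of_length_lt viable num_to_pick.toNat (by omega)]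
  · rw [if_neg (by omega)]
    rw [show ([[]] :: List.replicate num_to_pick.toNat ([] : List (List String)))
          = (combos ([] : List String) 0 :: rowsAux [] 1 num_to_pick.toNat) by
      rw [combos_zero, rowsAux_nil_one]]
    rw [foldl_rows num_to_pick.toNat viable.reverse []]
    simp only [List.append_nil, List.reverse_reverse]
    generalize hk : num_to_pick.toNat = n
    cases n with
    | zero => simp [combos_zero]
    | succ m =>
      simp only [List.getD_cons_succ]
      rw [getD_rowsAux viable [] (m + 1) 1 m (by omega), Nat.add_comm]

-- ---- A side ----

-- A's loop body, verbatim (same matcher shape as the port)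
def gRaw (ex : Option String) (cur viable : List String) (k : Int) (i : Int) : List (List String) :=
  match h : PySem.List.pyGet? viable i with
  | none => []
  | some v =>
    if ex.isSome ∧ ex = some v then []
    else recursive_combiner ex (cur ++ [v]) (PySem.List.slice viable (some (i + 1)) none) (k - 1)

-- the body of A's loop, in clean Nat-indexed form
def gClean (ex : Option String) (cur viable : List String) (k : Int) (j : Nat) : List (List String) :=
  match viable[j]? with
  | none => []
  | some v =>
    if ex.isSome ∧ ex = some v then []
    else recursive_combiner ex (cur ++ [v]) (viable.drop (j + 1)) (k - 1)

lemma combos_cons_pos (x : String) (xs : List String) (n : Nat) (hn : n ≠ 0) :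
    combos (x :: xs) n = ((combos xs (n - 1)).map (fun c => x :: c)) ++ combos xs n := by
  cases n with
  | zero => exact absurd rfl hn
  | succ m => simp only [combos, Nat.add_sub_cancel]

lemma recComb_zero (ex : Option String) (cur viable : List String) :
    recursive_combiner ex cur viable 0 = [cur] := by
  rw [recursive_combiner]; rfl

lemma recComb_unfold (ex : Option String) (cur viable : List String) (k : Int) (hk : k ≠ 0) :
    recursive_combiner ex cur viable k
      = ((List.range ((viable.length : Int) - k + 1).toNat).map (gClean ex cur viable k)).flatten := by
  rw [recursive_combiner, if_neg hk]
  refine Eq.trans (congrArg List.flatten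
    (@List.attach_map_val _ _ (PySem.List.pyRange 0 ((viable.length : Int) - k + 1) 1)
      (gRaw ex cur viable k))) ?_
  rw [PySem.List.pyRange_one, List.map_map]
  simp only [sub_zero]
  refine congrArg List.flatten (List.map_congr_left fun j hj => ?_)
  show gRaw ex cur viable k ((0:Int) + (j:Int)) = gClean ex cur viable k j
  unfold gRaw gClean
  have hg : PySem.List.pyGet? viable ((0:Int) + (j:Int)) = viable[j]? := by
    rw [zero_add]; exact PySem.List.pyGet?_natCast viable j
  split
  · next h =>
    rw [hg] at h
    rw [h]
  · next v h =>
    rw [hg] at h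
    rw [h]
    dsimp only
    rw [PySem.List.slice_from viable (by omega),
        show ((0:Int) + (j:Int) + 1).toNat = j + 1 by omega]

lemma recComb_big (ex : Option String) (cur viable : List String) (k : Int)
    (hk : k ≠ 0) (h : (viable.length : Int) < k) :
    recursive_combiner ex cur viable k = [] := by
  rw [recComb_unfold ex cur viable k hk]
  rw [show ((viable.length : Int) - k + 1).toNat = 0 by omega]
  rfl

lemma recComb_cons (ex : Option String) (cur : List String) (v : String) (rest : List String)
    (k : Int) (h1 : 1 ≤ k) (h2 : k ≤ ((v :: rest).length : Int)) :
    recursive_combiner ex cur (v :: rest) k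
      = (if ex.isSome ∧ ex = some v then []
         else recursive_combiner ex (cur ++ [v]) rest (k - 1))
        ++ recursive_combiner ex cur rest k := by
  rw [recComb_unfold ex cur (v :: rest) k (by omega),
      recComb_unfold ex cur rest k (by omega)]
  rw [show (((v :: rest).length : Int) - k + 1).toNat
        = ((rest.length : Int) - k + 1).toNat + 1 by simp at h2 ⊢; omega]
  rw [List.range_succ_eq_map, List.map_cons, List.flatten_cons]
  have hpt : ∀ j : Nat, gClean ex cur (v :: rest) k (Nat.succ j) = gClean ex cur rest k j := by
    intro j
    unfold gClean
    simp only [Nat.succ_eq_add_one, List.getElem?_cons_succ, List.drop_succ_cons]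
  congr 1
  rw [List.map_map]
  exact congrArg List.flatten (List.map_congr_left fun j _ => hpt j)

lemma recComb_eq (ex : Option String) : ∀ (viable cur : List String) (k : Int), 0 ≤ k →
    recursive_combiner ex cur viable k
      = (combos (viable.filter (fun s => !(some s == ex))) k.toNat).map (fun c => cur ++ c) := by
  intro viable
  induction viable with
  | nil =>
    intro cur k hk
    by_cases hk0 : k = 0
    · subst hk0; rw [recComb_zero]; simp [combos_zero]
    · rw [recComb_big ex cur [] k hk0 (by simp; omega)]
      rw [show k.toNat = (k.toNat - 1) + 1 by omega]
      simp [combos]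
  | cons v rest ih =>
    intro cur k hk
    by_cases hk0 : k = 0
    · subst hk0; rw [recComb_zero]; simp [combos_zero]
    · have h1 : (1:Int) ≤ k := by omega
      by_cases hbig : (((v :: rest).length : Int)) < k
      · rw [recComb_big ex cur (v :: rest) k hk0 hbig]
        rw [combos_of_length_lt _ _ (by
          have hfl := List.length_filter_le (fun s => !(some s == ex)) (v :: rest)
          simp only [List.length_cons] at hfl hbig
          omega)]
        rfl
      · rw [recComb_cons ex cur v rest k h1 (by omega)]
        by_cases hex : ex.isSome ∧ ex = some v
        · have hdrop : (!(some v == ex)) = false := by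
            rcases hex with ⟨_, he⟩; subst he; simp
          rw [if_pos hex, List.filter_cons, hdrop]
          simp only [Bool.false_eq_true, if_false, List.nil_append]
          exact ih cur k hk
        · have hkeep : (!(some v == ex)) = true := by
            cases ex with
            | none => simp
            | some e =>
              simp only [Option.isSome_some, true_and] at hex
              simp only [Bool.not_eq_true', beq_eq_false_iff_ne, ne_eq, Option.some.injEq]
              intro h
              exact hex (by rw [h])
          rw [if_neg hex, List.filter_cons, hkeep]
          simp only [if_true]
          rw [combos_cons_pos v _ k.toNat (by omega), List.map_append, List.map_map]
          congr 1
          · rw [ih (cur ++ [v]) (k - 1) (by omega),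
                show (k - 1).toNat = k.toNat - 1 by omega]
            refine List.map_congr_left fun c _ => ?_
            simp
          · exact ih cur k hk

-- ===== VERDICT (by name: the statement is the Claim_ definition above) =====
theorem station_combinations_spec : Claim_equal_station_combinations := by
  intro stations num_to_pick exclude_station _ hpre
  unfold Spec_station_combinations station_combinations
  rw [recComb_eq exclude_station stations [] num_to_pick hpre,
      alt_eq_combos stations num_to_pick exclude_station hpre]
  simp
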